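-- pv_equiv track=rewrite | github.com/hissue/Program-Solution | 프로그래머스/unrated/135808. 과일 장수/과일 장수.py | solution
-- ===== SOURCE A (Python) =====
-- def solution(k, m, score):
--     answer = 0
--     stack = []
--     for data in sorted(score,reverse=True):
--         stack.append(data)
--         if len(stack) == m:
--             answer += m*min(stack)
--             stack = []
--
--
--     return answer
-- ===== SOURCE B (Python) =====
-- def solution(k, m, score):
--     if m <= 0:
--         return 0
--     s = sorted(score, reverse=True)
--     return m * sum(s[i] for i in range(m - 1, len(s), m))
-- ===== Notes on version B (the rewrite author's own statement) =====
-- stated objective: simpler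
-- what changed: Replaces the stack-accumulate-and-reset loop with per-box min() calls by direct indexing: after one descending sort the minimum of box j sits at index (j+1)*m-1, so the answer is m times the sum of s[m-1], s[2m-1], ...
import Mathlib
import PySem

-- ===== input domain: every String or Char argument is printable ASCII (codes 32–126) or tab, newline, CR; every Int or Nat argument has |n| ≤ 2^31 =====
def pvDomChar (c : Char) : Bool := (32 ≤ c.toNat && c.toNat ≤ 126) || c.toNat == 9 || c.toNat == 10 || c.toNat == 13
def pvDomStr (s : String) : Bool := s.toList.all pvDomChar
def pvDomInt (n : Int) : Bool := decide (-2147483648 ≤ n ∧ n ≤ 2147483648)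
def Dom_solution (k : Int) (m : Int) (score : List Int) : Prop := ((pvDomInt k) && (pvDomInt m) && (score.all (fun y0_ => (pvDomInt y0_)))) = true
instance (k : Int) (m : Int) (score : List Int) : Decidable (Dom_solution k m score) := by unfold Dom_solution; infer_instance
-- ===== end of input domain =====

-- B drops A's stack/reset/min() grouping loop: after one descending sort it reads each box's
-- minimum directly at indices m-1, 2m-1, ... and returns m times their sum (objective: simpler).


-- ===== PORT A =====
-- the for-loop over sorted(score, reverse=True) with state (stack, answer)
def solnLoop (m : Int) (l : List Int) (stack : List Int) (ans : Int) : Int :=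
  match l with
  | [] => ans
  | d :: rest =>
    let stack' := stack ++ [d]
    if (stack'.length : Int) = m then
      -- min(stack') : stack' is nonempty here, so min? is some; getD 0 is never the default
      solnLoop m rest [] (ans + m * ((PySem.List.min? stack' (fun x => x)).getD 0))
    else
      solnLoop m rest stack' ans

def solution (k : Int) (m : Int) (score : List Int) : Int :=
  solnLoop m (PySem.List.sorted score (fun x => x) true) [] 0

-- ===== PORT B =====
def solution_alt (k : Int) (m : Int) (score : List Int) : Int :=
  if m ≤ 0 then 0
  else
    let s := PySem.List.sorted score (fun x => x) true
    m * ((PySem.List.pyRange (m - 1) (s.length : Int) m).map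
          (fun i => PySem.List.pyGetD s i 0)).sum

-- ===== PRECONDITION & SPEC =====
def Spec_solution (k : Int) (m : Int) (score : List Int) (out : Int) : Prop := out = solution_alt k m score
instance (k : Int) (m : Int) (score : List Int) (out : Int) : Decidable (Spec_solution k m score out) := by unfold Spec_solution; infer_instance

-- ===== CLAIM (what is proved, stated in full; the proofs are below) =====
def Claim_equal_solution : Prop := ∀ (k : Int) (m : Int) (score : List Int), Dom_solution k m score → Spec_solution k m score (solution k m score)

-- ===== LEMMAS AND PROOFS =====

-- with m ≤ 0 the length test can never fire, so A's loop returns ans unchanged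
lemma solnLoop_nonpos (m : Int) (hm : m ≤ 0) :
    ∀ (l stack : List Int) (ans : Int), solnLoop m l stack ans = ans := by
  intro l
  induction l with
  | nil => intro stack ans; rfl
  | cons d rest ih =>
    intro stack ans
    rw [solnLoop]
    have hne : ¬ (((stack ++ [d]).length : Int) = m) := by
      simp only [List.length_append, List.length_cons, List.length_nil]
      push_cast; omega
    simp only [hne, if_false]
    exact ih _ _

-- if the stack can never fill up, A's loop returns ans unchanged
lemma solnLoop_under (m : Int) :
    ∀ (l stack : List Int) (ans : Int), ((stack.length + l.length : Int) < m) →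
      solnLoop m l stack ans = ans := by
  intro l
  induction l with
  | nil => intro stack ans _; rfl
  | cons d rest ih =>
    intro stack ans h
    rw [solnLoop]
    have hne : ¬ (((stack ++ [d]).length : Int) = m) := by
      simp only [List.length_append, List.length_cons, List.length_nil] at *
      push_cast at *; omega
    simp only [hne, if_false]
    apply ih
    simp only [List.length_append, List.length_cons, List.length_nil] at *
    push_cast at *; omega

-- consuming one full box c: the loop flushes it, adding m * min(stack ++ c)
lemma solnLoop_fill (m : Int) :
    ∀ (c stack : List Int), c ≠ [] → ((stack.length + c.length : Int) = m) →
      ∀ (rest : List Int) (ans : Int),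
      solnLoop m (c ++ rest) stack ans =
        solnLoop m rest [] (ans + m * ((PySem.List.min? (stack ++ c) (fun x => x)).getD 0)) := by
  intro c
  induction c with
  | nil => intro stack h; exact absurd rfl h
  | cons d c' ih =>
    intro stack _ hlen rest ans
    rcases List.eq_nil_or_concat' c' with h | ⟨_, _, rfl⟩
    · subst h
      rw [List.singleton_append, solnLoop]
      have : ((stack ++ [d]).length : Int) = m := by
        simp only [List.length_append, List.length_cons, List.length_nil] at *
        push_cast at *; omega
      rw [if_pos this]
    · rw [List.cons_append, solnLoop]
      have hne : ¬ (((stack ++ [d]).length : Int) = m) := by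
        simp only [List.length_append, List.length_cons, List.length_nil] at *
        push_cast at *; omega
      simp only [hne, if_false]
      rw [ih (stack ++ [d]) (by simp) (by
        simp only [List.length_append, List.length_cons, List.length_nil] at *
        push_cast at *; omega)]
      rw [List.append_assoc, List.singleton_append]

-- in a descending list the last element is a lower bound
lemma getLast_le_of_pairwise :
    ∀ (xs : List Int) (hne : xs ≠ []), xs.Pairwise (fun a b => b ≤ a) →
      ∀ y ∈ xs, xs.getLast hne ≤ y := by
  intro xs
  induction xs with
  | nil => intro h; exact absurd rfl h
  | cons x t ih =>
    intro _ hp y hy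
    rcases List.eq_nil_or_concat' t with h | ⟨_, _, h⟩
    · subst h; simp at hy; simp [hy]
    · have hne' : t ≠ [] := by subst h; simp
      rw [List.getLast_cons hne']
      rcases List.mem_cons.mp hy with rfl | hyt
      · have hlast : t.getLast hne' ∈ t := List.getLast_mem hne'
        exact (List.pairwise_cons.mp hp).1 _ hlast
      · exact ih hne' (List.pairwise_cons.mp hp).2 y hyt

-- Python's min of a nonempty descending list is its last element
lemma min?_of_pairwise (xs : List Int) (hne : xs ≠ []) (hp : xs.Pairwise (fun a b => b ≤ a)) :
    (PySem.List.min? xs (fun x => x)).getD 0 = xs.getLast hne := by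
  cases hmin : PySem.List.min? xs (fun x => x) with
  | none => exact absurd ((PySem.List.min?_eq_none_iff _ _).mp hmin) hne
  | some v =>
    have hv : v ∈ xs := PySem.List.min?_mem hmin
    have h1 : v ≤ xs.getLast hne := PySem.List.min?_isMin hmin _ (List.getLast_mem hne)
    have h2 : xs.getLast hne ≤ v := getLast_le_of_pairwise xs hne hp v hv
    simp [le_antisymm h1 h2]

-- splitting B's stride-m index range at its head
lemma pyRange_chunk (m len : Int) (hm : 1 ≤ m) (hlen : m ≤ len) :
    PySem.List.pyRange (m - 1) len m =
      (m - 1) :: (PySem.List.pyRange (m - 1) (len - m) m).map (· + m) := by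
  rw [PySem.List.pyRange_of_pos _ _ (by omega), PySem.List.pyRange_of_pos _ _ (by omega)]
  have h1 : (m - 1 : Int) < len := by omega
  rw [if_pos h1]
  have harith : (len - (m - 1) + m - 1) = (len - m - (m - 1) + m - 1) + 1 * m := by ring
  have hdvd : ((len - (m - 1) + m - 1)) / m = ((len - m - (m - 1) + m - 1)) / m + 1 := by
    rw [harith, Int.add_mul_ediv_right _ _ (by omega : m ≠ 0)]
  have hq : (0:Int) ≤ (len - m - (m - 1) + m - 1) / m :=
    Int.ediv_nonneg (by omega) (by omega)
  by_cases h2 : (m - 1 : Int) < len - m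
  · rw [if_pos h2]
    have : ((len - (m - 1) + m - 1) / m).toNat = ((len - m - (m - 1) + m - 1) / m).toNat + 1 := by
      omega
    rw [this, List.range_succ_eq_map, List.map_cons, List.map_map, List.map_map]
    rw [List.cons_eq_cons]
    refine ⟨by push_cast; ring, ?_⟩
    apply List.map_congr_left
    intro q _
    simp only [Function.comp_apply]
    push_cast; ring
  · rw [if_neg h2]
    have hz : (len - m - (m - 1) + m - 1) / m = 0 := by
      apply Int.ediv_eq_zero_of_lt (by omega) (by omega)
    have : ((len - (m - 1) + m - 1) / m).toNat = 1 := by omega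
    rw [this]
    simp

-- main loop invariant: on a descending list, A's loop adds m times the sum of the
-- elements at indices m-1, 2m-1, ... (the minima of the complete boxes)
lemma solnLoop_eq_strideSum (m : Int) (hm : 1 ≤ m) :
    ∀ (n : Nat) (l : List Int), l.length = n → l.Pairwise (fun a b => b ≤ a) →
      ∀ (ans : Int),
      solnLoop m l [] ans =
        ans + m * ((PySem.List.pyRange (m - 1) (l.length : Int) m).map
          (fun i => PySem.List.pyGetD l i 0)).sum := by
  intro n
  induction n using Nat.strong_induction_on with
  | _ n ih =>
    intro l hlen hp ans
    by_cases hlt : (l.length : Int) < m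
    · rw [solnLoop_under m l [] ans (by simpa using hlt)]
      rw [PySem.List.pyRange_of_pos _ _ (by omega : (0:Int) < m), if_neg (by omega)]
      simp
    · push_neg at hlt
      have hmpos : 1 ≤ m.toNat := by omega
      have hmlen : m.toNat ≤ l.length := by omega
      have htake : l.take m.toNat ≠ [] := by
        intro h
        have h2 : (l.take m.toNat).length = 0 := by rw [h]; rfl
        rw [List.length_take] at h2
        omega
      have hsplit := (List.take_append_drop m.toNat l).symm
      -- LHS: flush the first box
      conv_lhs => rw [hsplit]
      rw [solnLoop_fill m (l.take m.toNat) [] htake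
            (by simp [List.length_take]; omega) (l.drop m.toNat) ans]
      rw [List.nil_append]
      -- the min of the first box is l[m.toNat - 1]
      have hplast : (l.take m.toNat).Pairwise (fun a b => b ≤ a) :=
        hp.sublist (List.take_sublist _ _)
      rw [min?_of_pairwise _ htake hplast]
      have hlast : (l.take m.toNat).getLast htake = l[m.toNat - 1]'(by omega) := by
        rw [List.getLast_eq_getElem]
        have hlt' : (l.take m.toNat).length - 1 < (l.take m.toNat).length := by
          simp [List.length_take]; omega
        rw [List.getElem_take]
        congr 1
        simp [List.length_take]; omega
      -- apply the IH to the rest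
      have hdrop : (l.drop m.toNat).Pairwise (fun a b => b ≤ a) :=
        hp.sublist (List.drop_sublist _ _)
      have hdlen : (l.drop m.toNat).length = l.length - m.toNat := List.length_drop
      rw [ih (l.length - m.toNat) (by omega) _ hdlen hdrop]
      -- RHS: split the stride range at its head
      rw [pyRange_chunk m (l.length : Int) hm hlt, List.map_cons, List.map_map]
      have hdcast : ((l.drop m.toNat).length : Int) = (l.length : Int) - m := by
        rw [hdlen]; omega
      rw [hdcast]
      have hhead : PySem.List.pyGetD l (m - 1) 0 = l[m.toNat - 1]'(by omega) := by
        rw [PySem.List.pyGetD_eq_getElem _ _ (by omega) (by push_cast; omega)]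
        congr 1; omega
      rw [hhead, hlast]
      have htail : ∀ i ∈ PySem.List.pyRange (m - 1) ((l.length : Int) - m) m,
          ((fun i => PySem.List.pyGetD l i 0) ∘ (· + m)) i
            = PySem.List.pyGetD (l.drop m.toNat) i 0 := by
        intro i hi
        have hmem := (PySem.List.mem_pyRange_iff_of_pos (by omega : (0:Int) < m) i).mp hi
        have h0i : 0 ≤ i := by omega
        have him : i + m < (l.length : Int) := by omega
        simp only [Function.comp]
        rw [PySem.List.pyGetD_eq_getElem _ _ (by omega) (by push_cast; omega),
            PySem.List.pyGetD_eq_getElem _ _ h0i (by rw [hdcast]; omega)]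
        rw [List.getElem_drop]
        congr 1; omega
      rw [List.map_congr_left htail, List.sum_cons]
      ring

-- ===== VERDICT (by name: the statement is the Claim_ definition above) =====
theorem solution_spec : Claim_equal_solution := by
  intro k m score _
  unfold Spec_solution solution solution_alt
  by_cases hm : m ≤ 0
  · rw [if_pos hm]
    exact solnLoop_nonpos m hm _ [] 0
  · rw [if_neg hm]
    have hp := PySem.List.sorted_pairwise_rev score (fun x => x)
    have := solnLoop_eq_strideSum m (by omega) _
      (PySem.List.sorted score (fun x => x) true) rfl (by simpa using hp) 0
    simpa using this
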